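-- pv_equiv track=rewrite | github.com/aaronGeb/competitive-programming | 15-Oct-2025/ Division + LCP  403239.py | max_k_for_L
-- ===== SOURCE A (Python) =====
-- from bisect import bisect_left
--
-- MOD1 = 10**9+7
--
-- MOD2 = 10**9+9
--
-- def get_hash(h1,h2,p1,p2,l,r):
--     x1 = (h1[r] - h1[l]*p1[r-l]) % MOD1
--     x2 = (h2[r] - h2[l]*p2[r-l]) % MOD2
--     return (x1,x2)
--
-- def max_k_for_L(s, k, L, hashes):
--     n = len(s)
--     if L == 0:
--         return k <= n
--     if L > n:
--         return False
--     h1,h2,p1,p2 = hashes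
--     prefix_hash = get_hash(h1,h2,p1,p2,0,L)
--     pos = []
--
--     for i in range(0, n - L + 1):
--         if get_hash(h1,h2,p1,p2,i,i+L) == prefix_hash:
--             pos.append(i)
--     if not pos or pos[0] != 0:
--         if 0 not in pos:
--             return False
--     cur = 0
--     count = 1
--     last_index = 0
--     while True:
--         need = cur + L
--         j = bisect_left(pos, need)
--         if j >= len(pos):
--             last_index = cur
--             break
--         cur = pos[j]
--         count += 1
--         last_index = cur
--         if count >= k:
--             if n - cur >= L:
--                 return True
--             else:
--                 continue
--     if n - last_index < L:
--         return False
--     return count >= k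
-- ===== SOURCE B (Python) =====
-- MOD1 = 10**9+7
-- MOD2 = 10**9+9
--
-- def get_hash(h1, h2, p1, p2, l, r):
--     x1 = (h1[r] - h1[l]*p1[r-l]) % MOD1
--     x2 = (h2[r] - h2[l]*p2[r-l]) % MOD2
--     return (x1, x2)
--
-- def max_k_for_L(s, k, L, hashes):
--     n = len(s)
--     if L == 0:
--         return k <= n
--     if L > n:
--         return False
--     h1, h2, p1, p2 = hashes
--     target = get_hash(h1, h2, p1, p2, 0, L)
--     if k <= 1:
--         return True
--     count = 1
--     next_allowed = L
--     for i in range(L, n - L + 1):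
--         if i >= next_allowed and get_hash(h1, h2, p1, p2, i, i + L) == target:
--             count += 1
--             if count >= k:
--                 return True
--             next_allowed = i + L
--     return False
-- ===== Notes on version B (the rewrite author's own statement) =====
-- stated objective: simpler
-- what changed: A first materialises the list `pos` of all positions whose hash matches the prefix hash and then walks it with a bisect-driven greedy while-loop; B does one greedy left-to-right scan over the start positions, counting a match only when it starts at or after next_allowed, with no intermediate list and no bisect.
-- outside the precondition, e.g. on max_k_for_L('', 3, -1, ([1, 0], [2, 1], [2], [1])): A returns True, B returns False
import Mathlib
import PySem

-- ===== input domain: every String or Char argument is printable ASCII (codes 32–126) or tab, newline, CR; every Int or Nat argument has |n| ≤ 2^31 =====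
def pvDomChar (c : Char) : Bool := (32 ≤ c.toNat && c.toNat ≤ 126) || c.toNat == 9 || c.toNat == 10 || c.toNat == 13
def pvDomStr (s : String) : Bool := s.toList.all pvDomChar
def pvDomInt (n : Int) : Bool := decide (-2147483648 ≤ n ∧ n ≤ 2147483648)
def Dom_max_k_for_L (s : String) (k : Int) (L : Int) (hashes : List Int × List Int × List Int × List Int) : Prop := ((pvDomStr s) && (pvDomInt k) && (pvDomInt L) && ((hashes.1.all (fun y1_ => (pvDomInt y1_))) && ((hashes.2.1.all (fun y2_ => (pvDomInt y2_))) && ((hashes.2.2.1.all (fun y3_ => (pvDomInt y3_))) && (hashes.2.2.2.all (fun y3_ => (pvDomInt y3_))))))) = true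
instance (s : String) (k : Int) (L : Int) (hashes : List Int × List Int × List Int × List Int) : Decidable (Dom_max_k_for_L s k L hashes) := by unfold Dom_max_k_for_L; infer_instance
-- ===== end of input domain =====

-- B replaces A's two-phase search (materialise the list `pos` of all matching positions, then a
-- bisect-driven greedy walk over it) by one greedy left-to-right scan; objective: simpler.

-- ===== PORT A =====

def pvMOD1 : Int := 10^9+7
def pvMOD2 : Int := 10^9+9

-- module-level helper get_hash (used by both Pythons); list indexing via pyGetD,
-- in range whenever Pre_ holds
def pvGetHash (h1 h2 p1 p2 : List Int) (l r : Int) : Int × Int :=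
  (PySem.Int.mod (PySem.List.pyGetD h1 r 0 - PySem.List.pyGetD h1 l 0 * PySem.List.pyGetD p1 (r - l) 0) pvMOD1,
   PySem.Int.mod (PySem.List.pyGetD h2 r 0 - PySem.List.pyGetD h2 l 0 * PySem.List.pyGetD p2 (r - l) 0) pvMOD2)

-- bisect.bisect_left on the sorted list pos = first index holding a value ≥ x
def pvBisectLeft (xs : List Int) (x : Int) : Nat := xs.findIdx (fun y => decide (x ≤ y))

-- A's `while True` loop; `last_index` always equals `cur` when the loop breaks, so the
-- post-loop code is inlined at the break.  Fuel k.toNat + 2 always suffices: every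
-- iteration either breaks or increments count, and once count ≥ k the loop returns
-- (n - cur ≥ L holds for every element of pos); the fuel-0 value mirrors the final return.
def pvALoop (pos : List Int) (n L k : Int) : Nat → Int → Int → Bool
  | 0, _, count => decide (k ≤ count)
  | fuel+1, cur, count =>
    let j := pvBisectLeft pos (cur + L)
    if pos.length ≤ j then
      -- break with last_index = cur, then: if n - last_index < L: return False; return count >= k
      if n - cur < L then false else decide (k ≤ count)
    else
      let cur' := pos.getD j 0
      if k ≤ count + 1 then
        if L ≤ n - cur' then true
        else pvALoop pos n L k fuel cur' (count + 1)   -- `continue`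
      else pvALoop pos n L k fuel cur' (count + 1)

def max_k_for_L (s : String) (k : Int) (L : Int) (hashes : List Int × List Int × List Int × List Int) : Bool :=
  let n : Int := PySem.Str.len s
  if L = 0 then decide (k ≤ n)
  else if n < L then false
  else
    let h1 := hashes.1
    let h2 := hashes.2.1
    let p1 := hashes.2.2.1
    let p2 := hashes.2.2.2
    let prefix_hash := pvGetHash h1 h2 p1 p2 0 L
    let pos := (PySem.List.pyRange 0 (n - L + 1) 1).foldl
      (fun acc i => if pvGetHash h1 h2 p1 p2 i (i + L) = prefix_hash then acc ++ [i] else acc) []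
    if (pos = [] ∨ pos.getD 0 0 ≠ 0) ∧ 0 ∉ pos then false
    else pvALoop pos n L k (k.toNat + 2) 0 1

-- ===== PORT B =====

-- the body of B's for-loop: state = (early-return flag, count, next_allowed)
def pvBStep (h1 h2 p1 p2 : List Int) (L k : Int) (target : Int × Int)
    (st : Option Bool × Int × Int) (i : Int) : Option Bool × Int × Int :=
  match st with
  | (some b, c, nx) => (some b, c, nx)
  | (none, c, nx) =>
    if nx ≤ i ∧ pvGetHash h1 h2 p1 p2 i (i + L) = target then
      if k ≤ c + 1 then (some true, c + 1, i + L) else (none, c + 1, i + L)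
    else (none, c, nx)

def max_k_for_L_alt (s : String) (k : Int) (L : Int) (hashes : List Int × List Int × List Int × List Int) : Bool :=
  let n : Int := PySem.Str.len s
  if L = 0 then decide (k ≤ n)
  else if n < L then false
  else
    let h1 := hashes.1
    let h2 := hashes.2.1
    let p1 := hashes.2.2.1
    let p2 := hashes.2.2.2
    let target := pvGetHash h1 h2 p1 p2 0 L
    if k ≤ 1 then true
    else
      let st := (PySem.List.pyRange L (n - L + 1) 1).foldl (pvBStep h1 h2 p1 p2 L k target)
        ((none : Option Bool), (1 : Int), L)
      st.1.getD false      -- some b: early `return True/False`; none: the final `return False`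

-- ===== PRECONDITION & SPEC =====
-- Pre_ keeps the helper's natural domain: L is a candidate prefix length, so 0 ≤ L (negative L, on
-- which A's answer goes through Python's negative-index wraparound, is excluded; see claim.json cites);
-- and whenever 0 < L ≤ len(s) the hash/power tables must be long enough for every lookup A performs
-- (h1,h2 up to index len(s), p1,p2 up to index L) — elsewhere A raises IndexError.
def Pre_max_k_for_L (s : String) (k : Int) (L : Int) (hashes : List Int × List Int × List Int × List Int) : Prop :=
  0 ≤ L ∧ (L = 0 ∨ PySem.Str.len s < L ∨
    (PySem.Str.len s + 1 ≤ (hashes.1.length : Int) ∧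
     PySem.Str.len s + 1 ≤ (hashes.2.1.length : Int) ∧
     L + 1 ≤ (hashes.2.2.1.length : Int) ∧
     L + 1 ≤ (hashes.2.2.2.length : Int)))
instance (s : String) (k : Int) (L : Int) (hashes : List Int × List Int × List Int × List Int) : Decidable (Pre_max_k_for_L s k L hashes) := by unfold Pre_max_k_for_L; infer_instance

def pvWitness_max_k_for_L : String × Int × Int × (List Int × List Int × List Int × List Int) :=
  ("ab", 2, 1, ([0, 1, 2], [0, 1, 2], [1, 1], [1, 1]))

def Spec_max_k_for_L (s : String) (k : Int) (L : Int) (hashes : List Int × List Int × List Int × List Int) (out : Bool) : Prop := out = max_k_for_L_alt s k L hashes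
instance (s : String) (k : Int) (L : Int) (hashes : List Int × List Int × List Int × List Int) (out : Bool) : Decidable (Spec_max_k_for_L s k L hashes out) := by unfold Spec_max_k_for_L; infer_instance

-- ===== CLAIM (what is proved, stated in full; the proofs are below) =====
def Claim_equal_max_k_for_L : Prop := ∀ (s : String) (k : Int) (L : Int) (hashes : List Int × List Int × List Int × List Int), Dom_max_k_for_L s k L hashes → Pre_max_k_for_L s k L hashes → Spec_max_k_for_L s k L hashes (max_k_for_L s k L hashes)

-- ===== LEMMAS AND PROOFS =====

-- the common greedy reference both loops are reduced to: scan the candidate start positions in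
-- order; take a match iff it starts at or after next_allowed; succeed as soon as count reaches k
def pvGreedy (m : Int → Bool) (k L : Int) : List Int → Int → Int → Bool
  | [], _, _ => false
  | i :: rest, c, nx =>
    if nx ≤ i ∧ m i = true then
      if k ≤ c + 1 then true else pvGreedy m k L rest (c + 1) (i + L)
    else pvGreedy m k L rest c nx

theorem pvGreedy_false (m : Int → Bool) (k L : Int) :
    ∀ (l : List Int) (c nx : Int), (∀ i ∈ l, m i = false) → pvGreedy m k L l c nx = false := by
  intro l
  induction l with
  | nil => intro c nx _; rfl
  | cons i rest ih =>
    intro c nx h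
    have hi : m i = false := h i (List.mem_cons_self ..)
    simp only [pvGreedy, hi]
    simp only [Bool.false_eq_true, and_false, if_false]
    exact ih c nx (fun x hx => h x (List.mem_cons_of_mem _ hx))

theorem pvGreedy_skip (m : Int → Bool) (k L : Int) :
    ∀ (d : Nat) (a b c nx : Int), (∀ i, a ≤ i → i < a + d → (i < nx ∨ m i = false)) →
      pvGreedy m k L (PySem.List.pyRange a b 1) c nx
        = pvGreedy m k L (PySem.List.pyRange (a + d) b 1) c nx := by
  intro d
  induction d with
  | zero => intro a b c nx _; norm_num
  | succ d ih =>
    intro a b c nx h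
    by_cases hab : a < b
    · rw [PySem.List.pyRange_one_cons hab]
      have ha : a < nx ∨ m a = false := h a le_rfl (by omega)
      have hcond : ¬ (nx ≤ a ∧ m a = true) := by
        intro hc
        obtain ⟨hc1, hc2⟩ := hc
        rcases ha with ha | ha
        · omega
        · rw [ha] at hc2; exact Bool.false_ne_true hc2
      rw [pvGreedy, if_neg hcond]
      have hstep := ih (a + 1) b c nx (fun i hi1 hi2 => h i (by omega) (by omega))
      have hd : a + 1 + ((d : Nat) : Int) = a + (((d + 1 : Nat) : Nat) : Int) := by push_cast; ring
      rw [hd] at hstep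
      exact hstep
    · rw [PySem.List.pyRange_one_eq_nil (by omega), PySem.List.pyRange_one_eq_nil (by omega)]

theorem pvGreedy_skip' (m : Int → Bool) (k L : Int) (a a' b c nx : Int) (haa : a ≤ a')
    (h : ∀ i, a ≤ i → i < a' → (i < nx ∨ m i = false)) :
    pvGreedy m k L (PySem.List.pyRange a b 1) c nx
      = pvGreedy m k L (PySem.List.pyRange a' b 1) c nx := by
  have h2 := pvGreedy_skip m k L (a' - a).toNat a b c nx (fun i hi1 hi2 => h i hi1 (by omega))
  have hd : a + (((a' - a).toNat : Nat) : Int) = a' := by omega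
  rw [hd] at h2
  exact h2

theorem pvBfold_frozen (h1 h2 p1 p2 : List Int) (L k : Int) (t : Int × Int) :
    ∀ (l : List Int) (b : Bool) (c nx : Int),
      l.foldl (pvBStep h1 h2 p1 p2 L k t) (some b, c, nx) = (some b, c, nx) := by
  intro l
  induction l with
  | nil => intro b c nx; rfl
  | cons i rest ih => intro b c nx; simpa [pvBStep] using ih b c nx

theorem pvBfold_greedy (h1 h2 p1 p2 : List Int) (L k : Int) (t : Int × Int) :
    ∀ (l : List Int) (c nx : Int), c < k →
      ((l.foldl (pvBStep h1 h2 p1 p2 L k t) (none, c, nx)).1.getD false)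
        = pvGreedy (fun i => decide (pvGetHash h1 h2 p1 p2 i (i + L) = t)) k L l c nx := by
  intro l
  induction l with
  | nil => intro c nx _; simp [pvGreedy]
  | cons i rest ih =>
    intro c nx hck
    by_cases hc : nx ≤ i ∧ pvGetHash h1 h2 p1 p2 i (i + L) = t
    · by_cases hkk : k ≤ c + 1
      · simp only [List.foldl_cons, pvBStep, if_pos hc, if_pos hkk, pvBfold_frozen, pvGreedy,
          decide_eq_true_eq, hc.1, hc.2, and_self, if_pos, Option.getD_some]
      · simp only [List.foldl_cons, pvBStep, if_pos hc, if_neg hkk]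
        rw [ih (c + 1) (i + L) (by omega)]
        simp only [pvGreedy, decide_eq_true_eq, hc.1, hc.2, and_self, if_pos, if_neg hkk]
    · simp only [List.foldl_cons, pvBStep, if_neg hc]
      rw [ih c nx hck]
      have hnc : ¬ (nx ≤ i ∧ (decide (pvGetHash h1 h2 p1 p2 i (i + L) = t)) = true) := by
        simpa using hc
      simp only [pvGreedy, if_neg hnc]

theorem pvALoop_succ (pos : List Int) (n L k : Int) (fuel : Nat) (cur count : Int) :
    pvALoop pos n L k (fuel + 1) cur count =
      (if pos.length ≤ pvBisectLeft pos (cur + L) then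
        (if n - cur < L then false else decide (k ≤ count))
      else if k ≤ count + 1 then
        (if L ≤ n - pos.getD (pvBisectLeft pos (cur + L)) 0 then true
         else pvALoop pos n L k fuel (pos.getD (pvBisectLeft pos (cur + L)) 0) (count + 1))
      else pvALoop pos n L k fuel (pos.getD (pvBisectLeft pos (cur + L)) 0) (count + 1)) := rfl

theorem pvALoop_greedy (m : Int → Bool) (n L k : Int) (hL1 : 1 ≤ L) (hLn : L ≤ n) :
    ∀ (fuel : Nat) (cur c : Int), 0 ≤ cur → cur ≤ n - L → c < k → (k - c).toNat < fuel →
      pvALoop ((PySem.List.pyRange 0 (n - L + 1) 1).filter m) n L k fuel cur c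
        = pvGreedy m k L (PySem.List.pyRange (cur + L) (n - L + 1) 1) c (cur + L) := by
  intro fuel
  induction fuel with
  | zero => intro cur c _ _ _ hf; omega
  | succ fuel ih =>
    intro cur c hcur0 hcurn hck hfuel
    set pos := (PySem.List.pyRange 0 (n - L + 1) 1).filter m with hpos
    have hmem_pos : ∀ x, x ∈ pos ↔ (0 ≤ x ∧ x < n - L + 1 ∧ m x = true) := by
      intro x
      simp [hpos, List.mem_filter, PySem.List.mem_pyRange_one, and_assoc]
    have hsorted : pos.Pairwise (· < ·) :=
      List.Pairwise.filter m (PySem.List.pairwise_lt_pyRange_one 0 (n - L + 1))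
    simp only [pvALoop, pvBisectLeft]
    set j := pos.findIdx (fun y => decide (cur + L ≤ y)) with hj
    by_cases hjlen : pos.length ≤ j
    · rw [if_pos hjlen]
      have hjeq : pos.findIdx (fun y => decide (cur + L ≤ y)) = pos.length :=
        le_antisymm List.findIdx_le_length (hj ▸ hjlen)
      have hnone : ∀ x ∈ pos, ¬ (cur + L ≤ x) := by
        intro x hx
        have := (List.findIdx_eq_length.mp hjeq) x hx
        simpa using this
      have hfalse : ∀ i ∈ PySem.List.pyRange (cur + L) (n - L + 1) 1, m i = false := by
        intro i hi
        rw [PySem.List.mem_pyRange_one] at hi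
        by_contra hmi
        have hmi' : m i = true := by
          cases h' : m i
          · exact absurd h' hmi
          · rfl
        have : i ∈ pos := (hmem_pos i).mpr ⟨by omega, hi.2, hmi'⟩
        exact hnone i this (by omega)
      rw [pvGreedy_false m k L _ c (cur + L) hfalse, if_neg (by omega)]
      simp
      omega
    · rw [if_neg hjlen]
      push_neg at hjlen
      have hgot : pos.getD j 0 = pos[j] := List.getD_eq_getElem pos 0 hjlen
      have hge : cur + L ≤ pos[j] := by
        have := @List.findIdx_getElem _ (fun y => decide (cur + L ≤ y)) pos (hj ▸ hjlen)
        simp only [decide_eq_true_eq] at this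
        exact this
      have hmemc : pos[j] ∈ pos := List.getElem_mem hjlen
      have hc0 : 0 ≤ pos[j] := ((hmem_pos _).mp hmemc).1
      have hcn : pos[j] < n - L + 1 := ((hmem_pos _).mp hmemc).2.1
      have hmc : m pos[j] = true := ((hmem_pos _).mp hmemc).2.2
      -- no matching position lies in [cur + L, pos[j])
      have hgap : ∀ i, cur + L ≤ i → i < pos[j] → m i = false := by
        intro i hi1 hi2
        by_contra hmi
        have hmi' : m i = true := by
          cases h' : m i
          · exact absurd h' hmi
          · rfl
        have himem : i ∈ pos := (hmem_pos i).mpr ⟨by omega, by omega, hmi'⟩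
        obtain ⟨i', hi'len, hi'eq⟩ := List.mem_iff_getElem.mp himem
        rcases lt_trichotomy i' j with h' | h' | h'
        · have hle := List.not_of_lt_findIdx (p := fun y => decide (cur + L ≤ y))
            (xs := pos) (hj ▸ h')
          simp only [decide_eq_false_iff_not] at hle
          exact hle (le_of_le_of_eq hi1 hi'eq.symm)
        · have hci : pos[i'] = pos[j] := by simp [h']
          omega
        · have hlt := (List.pairwise_iff_getElem.mp hsorted) j i' hjlen hi'len h'
          have : pos[j] < i := lt_of_lt_of_eq hlt hi'eq
          omega
      rw [hgot]
      rw [pvGreedy_skip' m k L (cur + L) pos[j] (n - L + 1) c (cur + L) hge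
        (fun i hi1 hi2 => Or.inr (hgap i hi1 hi2))]
      rw [PySem.List.pyRange_one_cons (by omega)]
      have hcond : cur + L ≤ pos[j] ∧ m pos[j] = true := ⟨hge, hmc⟩
      rw [pvGreedy, if_pos hcond]
      by_cases hk : k ≤ c + 1
      · rw [if_pos hk, if_pos (by omega), if_pos hk]
      · rw [if_neg hk, if_neg hk]
        rw [pvGreedy_skip' m k L (pos[j] + 1) (pos[j] + L) (n - L + 1) (c + 1) (pos[j] + L)
          (by omega) (fun i hi1 hi2 => Or.inl hi2)]
        exact ih pos[j] (c + 1) hc0 (by omega) (by omega) (by omega)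

-- the main branch 0 < L ≤ n: A's pos+bisect walk = B's single scan, both via pvGreedy
theorem pvMainBranch (h1 h2 p1 p2 : List Int) (n k L : Int) (hL1 : 1 ≤ L) (hLn : L ≤ n) :
    pvALoop ((PySem.List.pyRange 0 (n - L + 1) 1).filter
        (fun i => decide (pvGetHash h1 h2 p1 p2 i (i + L) = pvGetHash h1 h2 p1 p2 0 L)))
        n L k (k.toNat + 2) 0 1
      = (if k ≤ 1 then true
         else ((PySem.List.pyRange L (n - L + 1) 1).foldl
            (pvBStep h1 h2 p1 p2 L k (pvGetHash h1 h2 p1 p2 0 L))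
            ((none : Option Bool), (1 : Int), L)).1.getD false) := by
  set m : Int → Bool := fun i => decide (pvGetHash h1 h2 p1 p2 i (i + L) = pvGetHash h1 h2 p1 p2 0 L)
    with hm
  set pos := (PySem.List.pyRange 0 (n - L + 1) 1).filter m with hpos
  by_cases hk : k ≤ 1
  · rw [if_pos hk]
    have hfe : k.toNat + 2 = (k.toNat + 1) + 1 := rfl
    rw [hfe, pvALoop_succ]
    by_cases hjlen : pos.length ≤ pvBisectLeft pos (0 + L)
    · rw [if_pos hjlen, if_neg (by omega)]
      simp
      omega
    · rw [if_neg hjlen]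
      push_neg at hjlen
      rw [List.getD_eq_getElem pos 0 hjlen]
      have hmemc := List.getElem_mem hjlen
      have hmem2 := List.mem_of_mem_filter hmemc
      rw [PySem.List.mem_pyRange_one] at hmem2
      rw [if_pos (by omega : k ≤ 1 + 1), if_pos (by omega)]
  · rw [if_neg hk]
    rw [hpos, pvALoop_greedy m n L k hL1 hLn (k.toNat + 2) 0 1 le_rfl (by omega) (by omega)
      (by omega)]
    rw [zero_add, hm]
    exact (pvBfold_greedy h1 h2 p1 p2 L k (pvGetHash h1 h2 p1 p2 0 L)
      (PySem.List.pyRange L (n - L + 1) 1) 1 L (by omega)).symm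

-- ===== VERDICT (by name: the statement is the Claim_ definition above) =====
theorem max_k_for_L_spec : Claim_equal_max_k_for_L := by
  intro s k L hashes _hdom hpre
  obtain ⟨h1, h2, p1, p2⟩ := hashes
  obtain ⟨hL0, hcases⟩ := hpre
  unfold Spec_max_k_for_L
  simp only [max_k_for_L, max_k_for_L_alt]
  by_cases hLz : L = 0
  · rw [if_pos hLz, if_pos hLz]
  · rw [if_neg hLz, if_neg hLz]
    by_cases hnL : PySem.Str.len s < L
    · rw [if_pos hnL, if_pos hnL]
    · rw [if_neg hnL, if_neg hnL]
      have hL1 : 1 ≤ L := by omega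
      have hLn : L ≤ PySem.Str.len s := by omega
      rw [PySem.List.foldl_append_ite_eq_filter
        (fun i => pvGetHash h1 h2 p1 p2 i (i + L) = pvGetHash h1 h2 p1 p2 0 L)
        (PySem.List.pyRange 0 (PySem.Str.len s - L + 1) 1) []]
      rw [List.nil_append]
      -- 0 is always in pos (the prefix matches its own hash), so A's dead `return False`
      -- branch is never taken
      have h0mem : (0 : Int) ∈ (PySem.List.pyRange 0 (PySem.Str.len s - L + 1) 1).filter
          (fun i => decide (pvGetHash h1 h2 p1 p2 i (i + L) = pvGetHash h1 h2 p1 p2 0 L)) := by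
        rw [List.mem_filter]
        constructor
        · rw [PySem.List.mem_pyRange_one]; omega
        · simp
      rw [if_neg (fun hcontr => hcontr.2 h0mem)]
      exact pvMainBranch h1 h2 p1 p2 (PySem.Str.len s) k L hL1 hLn
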